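-- pv_equiv track=rewrite | github.com/ysig/GraKeL | grakel/kernels/cache/jsm.py | get_level_edges
-- ===== SOURCE A (Python) =====
-- def get_level_edges(D, N, h, nv):
--     """Derive the graph edges for all the given K_expansions.
--
--     Parameters
--     ----------
--     D : dict
--         Distance level dictionary as produced by produce_neighboorhoods
--         method of graph type objects.
--
--     N : dict
--         The neighborhood level dictionary as produced by produce_neighborhoods
--         method of graph type objects.
--
--     h : int
--         The number of layers of DB representations.
--         Also a valid number of levels for both dictionaries D, N.
--
--     nv : int
--         The number of vertices.
--
--     Returns
--     -------
--     E : dict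
--         An edge dictionary for edges, with the same structure as
--         the N dictionary, except having sets of touples as values.
--
--     """
--     E = {i: {j: set() for j in range(nv)} for i in range(h)}
--     for level in range(h):
--         for node in range(nv):
--             if level > 0:
--                 E[level][node] = E[level-1][node].copy()
--             for (i, j) in D[level]:
--                 if N[level][node]:
--                     E[level][node].add((i, j))
--     return E
-- ===== SOURCE B (Python) =====
-- def get_level_edges(D, N, h, nv):
--     """Stateless closed form: each cell E[level][node] is defined directly as the
--     set of all edges from levels 0..level whose neighborhood entry is truthy,
--     written as one nested comprehension (no mutable E, no level-to-level copies)."""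
--     return {level: {node: {e for l in range(level + 1)
--                              for e in D[l] if N[l][node]}
--                     for node in range(nv)}
--             for level in range(h)}
-- ===== Notes on version B (the rewrite author's own statement) =====
-- stated objective: simpler
-- what changed: Replaced A's incremental dynamic programming (mutable grid E, copying the previous level's set and conditionally adding D[level]'s elements one by one) by a single stateless nested comprehension that defines each cell E[level][node] directly in closed form as the set of edges of all levels 0..level whose neighborhood entry is truthy.
import Mathlib
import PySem

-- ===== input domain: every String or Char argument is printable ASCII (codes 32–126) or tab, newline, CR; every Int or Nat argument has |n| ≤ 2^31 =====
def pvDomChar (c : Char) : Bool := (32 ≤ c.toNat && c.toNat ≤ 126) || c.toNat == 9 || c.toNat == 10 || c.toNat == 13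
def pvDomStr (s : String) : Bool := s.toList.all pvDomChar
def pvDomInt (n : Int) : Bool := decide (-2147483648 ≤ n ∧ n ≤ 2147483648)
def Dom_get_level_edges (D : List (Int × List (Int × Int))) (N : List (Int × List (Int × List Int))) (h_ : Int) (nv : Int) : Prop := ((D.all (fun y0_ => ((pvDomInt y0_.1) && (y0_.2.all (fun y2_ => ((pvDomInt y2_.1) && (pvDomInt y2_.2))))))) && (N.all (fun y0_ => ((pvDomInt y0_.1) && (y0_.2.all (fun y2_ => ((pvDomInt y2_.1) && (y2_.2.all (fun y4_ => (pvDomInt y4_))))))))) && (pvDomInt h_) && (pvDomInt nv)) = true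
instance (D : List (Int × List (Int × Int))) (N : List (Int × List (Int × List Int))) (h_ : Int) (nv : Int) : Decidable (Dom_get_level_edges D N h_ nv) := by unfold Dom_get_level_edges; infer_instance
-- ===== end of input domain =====

-- B replaces A's incremental construction (mutable grid, level-to-level set copies,
-- per-element conditional adds) by one stateless nested comprehension defining each
-- cell directly in closed form (objective: simpler).

-- ===== PORT A =====
-- A: E = {i: {j: set() for j in range(nv)} for i in range(h)}; for level: for node:
--    copy E[level-1][node] when level>0, then add every pair of D[level] when N[level][node] is truthy.
def get_level_edges (D : List (Int × List (Int × Int))) (N : List (Int × List (Int × List Int))) (h_ : Int) (nv : Int) : List (Int × List (Int × List (Int × Int))) :=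
  let E : PySem.Dict Int (PySem.Dict Int (PySem.Set (Int × Int))) :=
    (PySem.List.pyRange 0 h_ 1).foldl (fun E i =>
      E.insert i ((PySem.List.pyRange 0 nv 1).foldl
        (fun d j => d.insert j ([] : PySem.Set (Int × Int))) PySem.Dict.empty)) PySem.Dict.empty
  let E := (PySem.List.pyRange 0 h_ 1).foldl (fun E level =>
    (PySem.List.pyRange 0 nv 1).foldl (fun E node =>
      let E := if 0 < level then
          E.modify level PySem.Dict.empty (fun inner =>
            inner.insert node ((E.getD (level - 1) PySem.Dict.empty).getD node []))
        else E
      ((PySem.Dict.mk D).getD level []).foldl (fun E ij =>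
        if ((PySem.Dict.mk ((PySem.Dict.mk N).getD level [])).getD node []) ≠ [] then
          E.modify level PySem.Dict.empty (fun inner =>
            inner.insert node (PySem.Set.add ((E.getD level PySem.Dict.empty).getD node []) ij))
        else E) E) E) E
  E.items.map (fun p => (p.1, p.2.items))

-- ===== PORT B =====
-- B: {level: {node: {e for l in range(level+1) for e in D[l] if N[l][node]}
--             for node in range(nv)} for level in range(h)}
-- The dict comprehensions run over range keys, which are distinct and in order, so each
-- one is exactly its association list in iteration order; the set comprehension is the
-- Set.add fold over the generator (exact).
def get_level_edges_alt (D : List (Int × List (Int × Int))) (N : List (Int × List (Int × List Int))) (h_ : Int) (nv : Int) : List (Int × List (Int × List (Int × Int))) :=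
  (PySem.List.pyRange 0 h_ 1).map (fun level =>
    (level, (PySem.List.pyRange 0 nv 1).map (fun node =>
      (node,
        (PySem.List.pyRange 0 (level + 1) 1).foldl (fun s l =>
          ((PySem.Dict.mk D).getD l []).foldl (fun s e =>
            if ((PySem.Dict.mk ((PySem.Dict.mk N).getD l [])).getD node []) ≠ [] then
              PySem.Set.add s e
            else s) s)
          ([] : PySem.Set (Int × Int))))))

-- ===== PRECONDITION & SPEC =====
-- Pre_ is exactly where the Python A returns without a KeyError: when nv > 0, every level of
-- range(h) must be a key of D and, when D[level] is nonempty, a key of N whose inner dict has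
-- every node of range(nv) as a key.  The two length bounds are implied (h resp. nv distinct
-- keys need at least that many entries); they only let the predicate evaluate fast when false.
def Pre_get_level_edges (D : List (Int × List (Int × Int))) (N : List (Int × List (Int × List Int))) (h_ : Int) (nv : Int) : Prop :=
  0 < nv →
    (h_ ≤ (D.length : Int) ∧
     ∀ l ∈ PySem.List.pyRange 0 h_ 1,
       (PySem.Dict.mk D).contains l = true ∧
       ((PySem.Dict.mk D).getD l [] ≠ [] →
         (PySem.Dict.mk N).contains l = true ∧
         nv ≤ ((((PySem.Dict.mk N).getD l []).length : Nat) : Int) ∧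
         ∀ v ∈ PySem.List.pyRange 0 nv 1,
           (PySem.Dict.mk ((PySem.Dict.mk N).getD l [])).contains v = true))
instance (D : List (Int × List (Int × Int))) (N : List (Int × List (Int × List Int))) (h_ : Int) (nv : Int) : Decidable (Pre_get_level_edges D N h_ nv) := by unfold Pre_get_level_edges; infer_instance
def pvWitness_get_level_edges : (List (Int × List (Int × Int))) × (List (Int × List (Int × List Int))) × Int × Int :=
  ([(0, [(1, 2)])], [(0, [(0, [5])])], 1, 1)

def Spec_get_level_edges (D : List (Int × List (Int × Int))) (N : List (Int × List (Int × List Int))) (h_ : Int) (nv : Int) (out : List (Int × List (Int × List (Int × Int)))) : Prop := out = get_level_edges_alt D N h_ nv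
instance (D : List (Int × List (Int × Int))) (N : List (Int × List (Int × List Int))) (h_ : Int) (nv : Int) (out : List (Int × List (Int × List (Int × Int)))) : Decidable (Spec_get_level_edges D N h_ nv out) := by unfold Spec_get_level_edges; infer_instance

-- ===== CLAIM (what is proved, stated in full; the proofs are below) =====
def Claim_equal_get_level_edges : Prop := ∀ (D : List (Int × List (Int × Int))) (N : List (Int × List (Int × List Int))) (h_ : Int) (nv : Int), Dom_get_level_edges D N h_ nv → Pre_get_level_edges D N h_ nv → Spec_get_level_edges D N h_ nv (get_level_edges D N h_ nv)

-- ===== LEMMAS AND PROOFS =====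

def pvRmap {ν : Type} (n : Nat) (g : Nat → ν) : List (Int × ν) :=
  (List.range n).map (fun (k : Nat) => ((k : Int), g k))

lemma pvRmap_keys {ν : Type} (n : Nat) (g : Nat → ν) :
    (PySem.Dict.mk (pvRmap n g)).keys = (List.range n).map (fun (k : Nat) => (k : Int)) := by
  simp only [PySem.Dict.keys, pvRmap, List.map_map]
  rfl

lemma pvRmap_keys_nodup {ν : Type} (n : Nat) (g : Nat → ν) :
    (PySem.Dict.mk (pvRmap n g)).keys.Nodup := by
  rw [pvRmap_keys]
  exact (List.nodup_range).map (fun a b h => by exact_mod_cast h)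

lemma pvRmap_contains {ν : Type} (n : Nat) (g : Nat → ν) (j : Nat) :
    (PySem.Dict.mk (pvRmap n g)).contains (j : Int) = decide (j < n) := by
  rw [PySem.Dict.contains_eq_decide_mem_keys, pvRmap_keys]
  simp [List.mem_map, List.mem_range]

lemma pvRmap_getD {ν : Type} (n : Nat) (g : Nat → ν) (j : Nat) (hj : j < n) (d : ν) :
    (PySem.Dict.mk (pvRmap n g)).getD (j : Int) d = g j := by
  refine PySem.Dict.getD_of_mem_items _ ?_ (pvRmap_keys_nodup n g) d
  exact List.mem_map.mpr ⟨j, List.mem_range.mpr hj, rfl⟩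

lemma pvRmap_congr {ν : Type} (n : Nat) (g g' : Nat → ν) (h : ∀ k < n, g k = g' k) :
    pvRmap n g = pvRmap n g' := by
  unfold pvRmap
  apply List.map_congr_left
  intro k hk
  rw [h k (List.mem_range.mp hk)]

lemma pvRmap_insert {ν : Type} (n : Nat) (g : Nat → ν) (j : Nat) (hj : j < n) (x : ν) :
    (PySem.Dict.mk (pvRmap n g)).insert (j : Int) x
      = PySem.Dict.mk (pvRmap n (fun k => if k = j then x else g k)) := by
  apply PySem.Dict.ext
  rw [PySem.Dict.items_insert_of_contains _ _ (by rw [pvRmap_contains]; simpa using hj)]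
  simp only [pvRmap, List.map_map]
  apply List.map_congr_left
  intro k hk
  by_cases hkj : k = j <;> simp [hkj, Function.comp]

lemma pvRmap_modify {ν : Type} (n : Nat) (g : Nat → ν) (j : Nat) (hj : j < n) (d : ν) (f : ν → ν) :
    (PySem.Dict.mk (pvRmap n g)).modify (j : Int) d f
      = PySem.Dict.mk (pvRmap n (fun k => if k = j then f (g j) else g k)) := by
  show (PySem.Dict.mk (pvRmap n g)).insert (j : Int) (f ((PySem.Dict.mk (pvRmap n g)).getD (j:Int) d)) = _
  rw [pvRmap_getD n g j hj, pvRmap_insert n g j hj]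

lemma pvFoldl_insert_range {ν : Type} (n : Nat) (w : Nat → ν) :
    (List.range n).foldl (fun d k => d.insert (k : Int) (w k)) PySem.Dict.empty
      = PySem.Dict.mk (pvRmap n w) := by
  apply PySem.Dict.ext
  rw [PySem.Dict.items_foldl_insert_fresh (List.range n) (fun k => (k : Int)) w _
    (fun a _ => by simp [PySem.Dict.contains_empty])
    ((List.nodup_range).map (fun a b h => by exact_mod_cast h))]
  simp [pvRmap, PySem.Dict.empty]

-- shared description of the cell values
def pvDl (D : List (Int × List (Int × Int))) (l : Int) : List (Int × Int) :=
  (PySem.Dict.mk D).getD l []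
def pvNl (N : List (Int × List (Int × List Int))) (l v : Int) : List Int :=
  (PySem.Dict.mk ((PySem.Dict.mk N).getD l [])).getD v []
def pvStep (D : List (Int × List (Int × Int))) (N : List (Int × List (Int × List Int)))
    (v : Int) (s : PySem.Set (Int × Int)) (l : Int) : PySem.Set (Int × Int) :=
  if pvNl N l v ≠ [] then (pvDl D l).foldl PySem.Set.add s else s
def pvAcc (D : List (Int × List (Int × Int))) (N : List (Int × List (Int × List Int)))
    (v : Int) : Nat → PySem.Set (Int × Int)
  | 0 => []
  | k + 1 => pvStep D N v (pvAcc D N v k) (k : Int)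

def pvGrid (hN vN : Nat) (f : Nat → Nat → PySem.Set (Int × Int)) :
    PySem.Dict Int (PySem.Dict Int (PySem.Set (Int × Int))) :=
  PySem.Dict.mk (pvRmap hN (fun l => PySem.Dict.mk (pvRmap vN (f l))))

lemma pvGrid_congr (hN vN : Nat) (f f' : Nat → Nat → PySem.Set (Int × Int))
    (h : ∀ l < hN, ∀ v < vN, f l v = f' l v) : pvGrid hN vN f = pvGrid hN vN f' := by
  unfold pvGrid
  exact congrArg _ (pvRmap_congr _ _ _ fun l hl =>
    congrArg _ (pvRmap_congr _ _ _ fun v hv => h l hl v hv))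

lemma pvGrid_cell_get (hN vN : Nat) (f : Nat → Nat → PySem.Set (Int × Int)) (L u : Nat)
    (hL : L < hN) (hu : u < vN) :
    ((pvGrid hN vN f).getD (L : Int) PySem.Dict.empty).getD (u : Int) [] = f L u := by
  unfold pvGrid
  rw [pvRmap_getD _ _ L hL, pvRmap_getD _ _ u hu]

lemma pvGrid_cell_set (hN vN : Nat) (f : Nat → Nat → PySem.Set (Int × Int)) (L u : Nat)
    (hL : L < hN) (hu : u < vN) (x : PySem.Set (Int × Int)) :
    (pvGrid hN vN f).modify (L : Int) PySem.Dict.empty (fun inner => inner.insert (u : Int) x)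
      = pvGrid hN vN (fun l v => if l = L ∧ v = u then x else f l v) := by
  unfold pvGrid
  rw [pvRmap_modify _ _ L hL]
  apply congrArg
  apply pvRmap_congr
  intro l hl
  by_cases hlL : l = L
  · subst hlL
    simp only [if_true]
    rw [pvRmap_insert _ _ u hu]
    apply congrArg
    apply pvRmap_congr
    intro v hv
    by_cases hvu : v = u <;> simp [hvu]
  · simp only [if_neg hlL]
    apply congrArg
    apply pvRmap_congr
    intro v hv
    simp [hlL]

-- the conditional element-add loop of A over one cell
lemma pvA_fold_cell (hN vN : Nat) (L u : Nat) (hL : L < hN) (hu : u < vN)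
    (lst : List (Int × Int)) (c : Prop) [Decidable c]
    (f : Nat → Nat → PySem.Set (Int × Int)) :
    lst.foldl (fun E ij =>
        if c then
          E.modify (L : Int) PySem.Dict.empty (fun inner =>
            inner.insert (u : Int)
              (PySem.Set.add ((E.getD (L : Int) PySem.Dict.empty).getD (u : Int) []) ij))
        else E) (pvGrid hN vN f)
      = pvGrid hN vN (fun l v => if l = L ∧ v = u then
          (if c then lst.foldl PySem.Set.add (f L u) else f L u) else f l v) := by
  by_cases hc : c
  · simp only [if_pos hc]
    induction lst generalizing f with
    | nil =>
      simp only [List.foldl_nil]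
      apply pvGrid_congr
      intro l hl v hv
      by_cases h : l = L ∧ v = u
      · simp [h.1, h.2]
      · simp [if_neg h]
    | cons ij t ih =>
      simp only [List.foldl_cons]
      rw [pvGrid_cell_get hN vN f L u hL hu, pvGrid_cell_set hN vN f L u hL hu]
      rw [ih]
      apply pvGrid_congr
      intro l hl v hv
      by_cases h : l = L ∧ v = u <;> simp [h]
  · simp only [if_neg hc]
    rw [List.foldl_fixed]
    apply pvGrid_congr
    intro l hl v hv
    by_cases h : l = L ∧ v = u
    · simp [h.1, h.2]
    · simp [if_neg h]


def pvFA (D : List (Int × List (Int × Int))) (N : List (Int × List (Int × List Int)))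
    (L u : Nat) : Nat → Nat → PySem.Set (Int × Int) := fun l v =>
  if l < L then pvAcc D N (v : Int) (l + 1)
  else if l = L ∧ v < u then pvAcc D N (v : Int) (L + 1) else []

lemma pvA_node (D : List (Int × List (Int × Int))) (N : List (Int × List (Int × List Int)))
    (hN vN L u : Nat) (hL : L < hN) (hu : u < vN) :
    List.foldl (fun E ij =>
        if (PySem.Dict.mk ((PySem.Dict.mk N).getD (L : Int) [])).getD (u : Int) [] ≠ [] then
          E.modify ((L : Int)) PySem.Dict.empty fun inner =>
            inner.insert ((u : Int)) (((E.getD ((L : Int)) PySem.Dict.empty).getD (u : Int) []).add ij)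
        else E)
      (if 0 < (L : Int) then
          (pvGrid hN vN (pvFA D N L u)).modify ((L : Int)) PySem.Dict.empty fun inner =>
            inner.insert ((u : Int))
              (((pvGrid hN vN (pvFA D N L u)).getD ((L : Int) - 1) PySem.Dict.empty).getD (u : Int) [])
        else pvGrid hN vN (pvFA D N L u))
      ((PySem.Dict.mk D).getD (L : Int) [])
    = pvGrid hN vN (pvFA D N L (u + 1)) := by
  have hstart : (if 0 < (L : Int) then
          (pvGrid hN vN (pvFA D N L u)).modify ((L : Int)) PySem.Dict.empty fun inner =>
            inner.insert ((u : Int))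
              (((pvGrid hN vN (pvFA D N L u)).getD ((L : Int) - 1) PySem.Dict.empty).getD (u : Int) [])
        else pvGrid hN vN (pvFA D N L u))
      = pvGrid hN vN (fun l v => if l = L ∧ v = u then pvAcc D N (u : Int) L else pvFA D N L u l v) := by
    by_cases hL0 : 0 < L
    · rw [if_pos (by exact_mod_cast hL0)]
      have hcast : ((L : Int) - 1) = ((L - 1 : Nat) : Int) := by omega
      rw [hcast, pvGrid_cell_get hN vN _ (L - 1) u (by omega) hu,
        pvGrid_cell_set hN vN _ L u hL hu]
      have hval : pvFA D N L u (L - 1) u = pvAcc D N (u : Int) L := by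
        unfold pvFA
        rw [if_pos (by omega)]
        congr 1
        omega
      rw [hval]
    · rw [if_neg (by exact_mod_cast hL0)]
      apply pvGrid_congr
      intro l hl v hv
      by_cases h : l = L ∧ v = u
      · obtain ⟨hlL, hvu⟩ := h
        rw [hlL, hvu, if_pos (⟨rfl, rfl⟩ : (L : ℕ) = L ∧ (u : ℕ) = u)]
        have hL0' : L = 0 := by omega
        rw [hL0']
        simp [pvFA, pvAcc]
      · simp [if_neg h]
  rw [hstart, pvA_fold_cell hN vN L u hL hu]
  apply pvGrid_congr
  intro l hl v hv
  have hfLu : (if L = L ∧ u = u then pvAcc D N (u : Int) L else pvFA D N L u L u)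
      = pvAcc D N (u : Int) L := if_pos ⟨rfl, rfl⟩
  by_cases h : l = L ∧ v = u
  · rw [if_pos h, hfLu]
    obtain ⟨hlL, hvu⟩ := h
    rw [hlL, hvu]
    have hres : pvFA D N L (u + 1) L u = pvAcc D N (u : Int) (L + 1) := by
      unfold pvFA
      rw [if_neg (by omega), if_pos (by omega)]
    rw [hres]
    have hstep : pvAcc D N (u : Int) (L + 1)
        = pvStep D N (u : Int) (pvAcc D N (u : Int) L) (L : Int) := rfl
    rw [hstep]
    unfold pvStep pvNl pvDl
    rfl
  · rw [if_neg h, if_neg h]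
    unfold pvFA
    split_ifs <;> first | rfl | (exfalso; omega)

lemma pvA_inner (D : List (Int × List (Int × Int))) (N : List (Int × List (Int × List Int)))
    (hN vN L : Nat) (hL : L < hN) : ∀ u, u ≤ vN →
    List.foldl (fun x (y_1 : Nat) =>
        List.foldl (fun E ij =>
            if (PySem.Dict.mk ((PySem.Dict.mk N).getD (L : Int) [])).getD (y_1 : Int) [] ≠ [] then
              E.modify ((L : Int)) PySem.Dict.empty fun inner =>
                inner.insert ((y_1 : Int))
                  (((E.getD ((L : Int)) PySem.Dict.empty).getD (y_1 : Int) []).add ij)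
            else E)
          (if 0 < (L : Int) then
              x.modify ((L : Int)) PySem.Dict.empty fun inner =>
                inner.insert ((y_1 : Int)) ((x.getD ((L : Int) - 1) PySem.Dict.empty).getD (y_1 : Int) [])
            else x)
          ((PySem.Dict.mk D).getD (L : Int) []))
      (pvGrid hN vN (pvFA D N L 0)) (List.range u)
    = pvGrid hN vN (pvFA D N L u) := by
  intro u
  induction u with
  | zero => intro _; rfl
  | succ u ih =>
    intro hu
    rw [List.range_succ, List.foldl_append, ih (by omega), List.foldl_cons, List.foldl_nil]
    exact pvA_node D N hN vN L u hL (by omega)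

lemma pvA_levels (D : List (Int × List (Int × Int))) (N : List (Int × List (Int × List Int)))
    (hN vN : Nat) : ∀ L, L ≤ hN →
    List.foldl (fun x (y : Nat) =>
        List.foldl (fun x (y_1 : Nat) =>
            List.foldl (fun E ij =>
                if (PySem.Dict.mk ((PySem.Dict.mk N).getD (y : Int) [])).getD (y_1 : Int) [] ≠ [] then
                  E.modify ((y : Int)) PySem.Dict.empty fun inner =>
                    inner.insert ((y_1 : Int))
                      (((E.getD ((y : Int)) PySem.Dict.empty).getD (y_1 : Int) []).add ij)
                else E)
              (if 0 < (y : Int) then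
                  x.modify ((y : Int)) PySem.Dict.empty fun inner =>
                    inner.insert ((y_1 : Int)) ((x.getD ((y : Int) - 1) PySem.Dict.empty).getD (y_1 : Int) [])
                else x)
              ((PySem.Dict.mk D).getD (y : Int) []))
          x (List.range vN))
      (pvGrid hN vN (fun _ _ => [])) (List.range L)
    = pvGrid hN vN (pvFA D N L 0) := by
  intro L
  induction L with
  | zero =>
    intro _
    simp only [List.range_zero, List.foldl_nil]
    apply pvGrid_congr
    intro l hl v hv
    simp [pvFA]
  | succ L ih =>
    intro hL
    rw [List.range_succ, List.foldl_append, ih (by omega), List.foldl_cons, List.foldl_nil]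
    rw [pvA_inner D N hN vN L (by omega) vN (le_refl _)]
    apply pvGrid_congr
    intro l hl v hv
    unfold pvFA
    split_ifs <;> first | rfl | (exfalso; omega) | (congr 1; omega)

def pvOut (D : List (Int × List (Int × Int))) (N : List (Int × List (Int × List Int)))
    (h_ nv : Int) : List (Int × List (Int × List (Int × Int))) :=
  pvRmap h_.toNat (fun l => pvRmap nv.toNat (fun v => pvAcc D N (v : Int) (l + 1)))

lemma pvRmap_map {ν μ : Type} (n : Nat) (g : Nat → ν) (F : ν → μ) :
    (pvRmap n g).map (fun p => (p.1, F p.2)) = pvRmap n (fun k => F (g k)) := by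
  unfold pvRmap
  rw [List.map_map]
  rfl

theorem pvA_eq (D : List (Int × List (Int × Int))) (N : List (Int × List (Int × List Int)))
    (h_ nv : Int) : get_level_edges D N h_ nv = pvOut D N h_ nv := by
  unfold get_level_edges
  simp only [PySem.List.pyRange_one, sub_zero, zero_add, List.foldl_map]
  rw [pvFoldl_insert_range nv.toNat (fun _ => ([] : PySem.Set (Int × Int)))]
  rw [pvFoldl_insert_range h_.toNat
    (fun _ => PySem.Dict.mk (pvRmap nv.toNat (fun _ => ([] : PySem.Set (Int × Int)))))]
  rw [show PySem.Dict.mk (pvRmap h_.toNat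
      (fun _ => PySem.Dict.mk (pvRmap nv.toNat (fun _ => ([] : PySem.Set (Int × Int))))))
    = pvGrid h_.toNat nv.toNat (fun _ _ => []) from rfl]
  rw [pvA_levels D N h_.toNat nv.toNat h_.toNat (le_refl _)]
  unfold pvGrid pvOut
  rw [show (PySem.Dict.mk (pvRmap h_.toNat
      (fun l => PySem.Dict.mk (pvRmap nv.toNat (pvFA D N h_.toNat 0 l))))).items
    = pvRmap h_.toNat (fun l => PySem.Dict.mk (pvRmap nv.toNat (pvFA D N h_.toNat 0 l))) from rfl]
  rw [pvRmap_map]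
  apply pvRmap_congr
  intro l hl
  rw [show (PySem.Dict.mk (pvRmap nv.toNat (pvFA D N h_.toNat 0 l))).items
    = pvRmap nv.toNat (pvFA D N h_.toNat 0 l) from rfl]
  apply pvRmap_congr
  intro v hv
  unfold pvFA
  rw [if_pos hl]

-- B's cell fold over the levels equals the pvAcc description
lemma pvB_cell (D : List (Int × List (Int × Int))) (N : List (Int × List (Int × List Int)))
    (v : Int) : ∀ n : Nat,
    (List.range n).foldl (fun s (l : Nat) =>
        ((PySem.Dict.mk D).getD (l : Int) []).foldl (fun s e =>
          if ((PySem.Dict.mk ((PySem.Dict.mk N).getD (l : Int) [])).getD v []) ≠ [] then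
            PySem.Set.add s e
          else s) s)
      ([] : PySem.Set (Int × Int))
    = pvAcc D N v n := by
  intro n
  induction n with
  | zero => rfl
  | succ n ih =>
    rw [List.range_succ, List.foldl_append, ih, List.foldl_cons, List.foldl_nil]
    have hstep : pvAcc D N v (n + 1) = pvStep D N v (pvAcc D N v n) (n : Int) := rfl
    rw [hstep]
    unfold pvStep pvNl pvDl
    by_cases hc : (PySem.Dict.mk ((PySem.Dict.mk N).getD (n : Int) [])).getD v [] ≠ []
    · rw [if_pos hc]
      simp only [if_pos hc]
    · rw [if_neg hc]
      simp only [if_neg hc]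
      rw [List.foldl_fixed]

theorem pvB_eq (D : List (Int × List (Int × Int))) (N : List (Int × List (Int × List Int)))
    (h_ nv : Int) : get_level_edges_alt D N h_ nv = pvOut D N h_ nv := by
  unfold get_level_edges_alt pvOut
  simp only [PySem.List.pyRange_one, sub_zero, zero_add, List.map_map, Function.comp_def]
  unfold pvRmap
  apply List.map_congr_left
  intro L hL
  refine congrArg _ ?_
  apply List.map_congr_left
  intro v hv
  refine congrArg _ ?_
  have hcast : ((L : Int) + 1) = (((L + 1 : Nat)) : Int) := by push_cast; ring
  rw [hcast]
  simp only [Int.toNat_natCast, List.foldl_map]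
  exact pvB_cell D N (v : Int) (L + 1)

-- ===== VERDICT (by name: the statement is the Claim_ definition above) =====
theorem get_level_edges_spec : Claim_equal_get_level_edges := by
  intro D N h_ nv _ _
  unfold Spec_get_level_edges
  rw [pvA_eq, pvB_eq]
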